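-- pv_equiv track=rewrite | github.com/damianoda96/pcr_simulator | Project1.py | round_max
-- ===== SOURCE A (Python) =====
-- def round_max(max_val):
--
--     import math
--
--     digits = int(math.log10(max_val)) + 1 # for getting # of digits in an integer
--
--     rounded_max_val = 0
--
--     digit_str = str(max_val)
--     rounded_max_val_str = ""
--
--     # This is way too complicated but it works..
--
--     if digits > 1:
--         if int(digit_str[0]) != 9:
--             if int(digit_str[1]) >= 5:
--                 rounded_max_val_str += str(int(digit_str[0]) + 1)
--
--                 for i in range(len(digit_str)):
--                     if i > 0:
--                         rounded_max_val_str += '0'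
--
--             else:
--                 rounded_max_val_str += digit_str[0]
--                 rounded_max_val_str += '5'
--
--                 for i in range(len(digit_str)):
--                     if i > 1:
--                         rounded_max_val_str += '0'
--
--         else:
--             for i in range(len(digit_str)):
--                 if i > 0:
--                     rounded_max_val_str += '0'
--                 else:
--                     rounded_max_val_str += '1'
--
--             rounded_max_val_str += '0'
--
--         rounded_max_val = int(rounded_max_val_str)
--
--     else:
--         rounded_max_val = 10
--
--     return rounded_max_val
-- ===== SOURCE B (Python) =====
-- def _p10(n):
--     # largest power of 10 that is <= n (n >= 1)
--     return 1 if n < 10 else 10 * _p10(n // 10)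
--
-- def round_max(max_val):
--     if max_val < 10:
--         return 10
--     p = _p10(max_val)                    # 10**(number of digits - 1)
--     d0 = max_val // p                    # leading digit
--     d1 = (max_val // (p // 10)) % 10     # second digit
--     if d0 == 9:
--         return 10 * p
--     if d1 >= 5:
--         return (d0 + 1) * p
--     return d0 * p + 5 * (p // 10)
-- ===== Notes on version B (the rewrite author's own statement) =====
-- stated objective: simpler
-- what changed: Replaces A's string surgery (str(max_val), per-branch zero-appending loops, int() re-parse) with pure integer arithmetic: the largest power of ten p <= max_val and the two leading digits are computed by division, and each branch is a closed-form product over p.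
import Mathlib
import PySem

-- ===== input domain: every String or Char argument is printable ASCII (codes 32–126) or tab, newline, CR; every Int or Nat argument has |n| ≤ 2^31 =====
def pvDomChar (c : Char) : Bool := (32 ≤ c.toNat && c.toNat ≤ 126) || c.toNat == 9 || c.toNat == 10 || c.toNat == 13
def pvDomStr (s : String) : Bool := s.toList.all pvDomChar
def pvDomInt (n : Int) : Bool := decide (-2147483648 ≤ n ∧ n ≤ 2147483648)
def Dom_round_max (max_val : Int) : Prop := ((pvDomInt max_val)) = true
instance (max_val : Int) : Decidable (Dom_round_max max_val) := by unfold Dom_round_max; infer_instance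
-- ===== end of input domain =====

-- B replaces A's string surgery (str / zero-appending loops / int() re-parse) with closed-form
-- integer arithmetic over the largest power of ten; objective: simpler.

-- ===== PORT A =====
-- hand port of 'int(math.log10(max_val))' for max_val ≥ 1: the floor base-10 logarithm. Exact on
-- Pre_ ∩ Dom (1 ≤ max_val ≤ 2^31), where CPython's float log10 floors to exactly this value.
def intLog10 (m : Nat) : Nat :=
  if 10 ≤ m then intLog10 (m / 10) + 1 else 0
decreasing_by exact Nat.div_lt_self (by omega) (by omega)

def round_max (max_val : Int) : Int :=
  let digits : Int := (intLog10 max_val.toNat : Int) + 1   -- int(math.log10(max_val)) + 1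
  let digit_str : List Char := PySem.Int.toChars max_val    -- str(max_val)
  if 1 < digits then
    -- int(digit_str[0]) / int(digit_str[1]); under Pre_ and digits > 1 these always succeed
    match PySem.List.pyGet? digit_str 0, PySem.List.pyGet? digit_str 1 with
    | some c0, some c1 =>
      match PySem.Int.ofChars? [c0], PySem.Int.ofChars? [c1] with
      | some d0, some d1 =>
        let s : List Char :=
          if d0 ≠ 9 then
            if 5 ≤ d1 then
              (PySem.List.pyRange 0 (digit_str.length : Int) 1).foldl
                (fun acc i => if 0 < i then acc ++ ['0'] else acc)
                (PySem.Int.toChars (d0 + 1))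
            else
              (PySem.List.pyRange 0 (digit_str.length : Int) 1).foldl
                (fun acc i => if 1 < i then acc ++ ['0'] else acc)
                ([c0] ++ ['5'])
          else
            ((PySem.List.pyRange 0 (digit_str.length : Int) 1).foldl
              (fun acc i => if 0 < i then acc ++ ['0'] else acc ++ ['1']) []) ++ ['0']
        (PySem.Int.ofChars? s).getD 0   -- int(rounded_max_val_str); always parses (digit chars only)
      | _, _ => 0   -- unreachable under Pre_ (digits > 1 gives at least two digit characters)
    | _, _ => 0     -- unreachable under Pre_
  else 10

-- ===== PORT B =====
def pow10Below (n : Int) : Int :=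
  if n < 10 then 1 else 10 * pow10Below (PySem.Int.floordiv n 10)
termination_by n.toNat
decreasing_by
  rename_i h
  rw [PySem.Int.floordiv_eq_ediv_of_pos (by omega)]
  omega

def round_max_alt (max_val : Int) : Int :=
  if max_val < 10 then 10
  else
    let p := pow10Below max_val
    let d0 := PySem.Int.floordiv max_val p
    let d1 := PySem.Int.mod (PySem.Int.floordiv max_val (PySem.Int.floordiv p 10)) 10
    if d0 = 9 then 10 * p
    else if 5 ≤ d1 then (d0 + 1) * p
    else d0 * p + 5 * PySem.Int.floordiv p 10

-- ===== PRECONDITION & SPEC =====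
-- Pre_ excludes exactly max_val ≤ 0, where A raises: math.log10 raises ValueError ('math domain error').
def Pre_round_max (max_val : Int) : Prop := 1 ≤ max_val
instance (max_val : Int) : Decidable (Pre_round_max max_val) := by unfold Pre_round_max; infer_instance
def pvWitness_round_max : Int := 137

def Spec_round_max (max_val : Int) (out : Int) : Prop := out = round_max_alt max_val
instance (max_val : Int) (out : Int) : Decidable (Spec_round_max max_val out) := by unfold Spec_round_max; infer_instance

-- ===== CLAIM (what is proved, stated in full; the proofs are below) =====
def Claim_equal_round_max : Prop := ∀ (max_val : Int), Dom_round_max max_val → Pre_round_max max_val → Spec_round_max max_val (round_max max_val)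

-- ===== LEMMAS AND PROOFS =====
def digitsAux (m : Nat) : List Char :=
  if m < 10 then [Nat.digitChar m]
  else digitsAux (m / 10) ++ [Nat.digitChar (m % 10)]
decreasing_by exact Nat.div_lt_self (by omega) (by omega)

theorem toDigitsCore_eq_digitsAux (f : Nat) :
    ∀ (m : Nat) (ds : List Char), m < f →
      Nat.toDigitsCore 10 f m ds = digitsAux m ++ ds := by
  induction f with
  | zero => intro m ds h; omega
  | succ f ih =>
    intro m ds h
    rw [Nat.toDigitsCore]
    by_cases h10 : m < 10
    · have hz : m / 10 = 0 := by omega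
      simp only [hz]
      rw [digitsAux, if_pos h10, Nat.mod_eq_of_lt h10]
      rfl
    · have hne : ¬ m / 10 = 0 := by omega
      simp only [hne, if_false]
      rw [ih (m / 10) _ (by omega)]
      conv_rhs => rw [digitsAux, if_neg h10]
      simp

theorem toChars_natCast (m : Nat) :
    PySem.Int.toChars (m : Int) = digitsAux m := by
  rw [PySem.Int.toChars, if_neg (by omega)]
  simp only [Int.toNat_natCast]
  simpa using toDigitsCore_eq_digitsAux (m + 1) m [] (by omega)

theorem digitsAux_eq_map (k : Nat) : ∀ (m : Nat), 10 ^ k ≤ m → m < 10 ^ (k + 1) →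
    digitsAux m = (List.range (k + 1)).map (fun i => Nat.digitChar (m / 10 ^ (k - i) % 10)) := by
  induction k with
  | zero =>
    intro m h1 h2
    rw [digitsAux, if_pos (by omega)]
    simp [List.range_succ, Nat.mod_eq_of_lt (by omega : m < 10)]
  | succ k ih =>
    intro m h1 h2
    have h10 : (10:Nat) ≤ 10 ^ (k + 1) := Nat.le_self_pow (Nat.succ_ne_zero k) 10
    rw [digitsAux, if_neg (by omega)]
    rw [ih _ (by rw [Nat.le_div_iff_mul_le (by omega), ← pow_succ]; exact h1)
          (by rw [Nat.div_lt_iff_lt_mul (by omega), ← pow_succ]; exact h2)]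
    conv_rhs => rw [List.range_succ, List.map_append]
    congr 1
    · apply List.map_congr_left
      intro i hi
      simp only [List.mem_range] at hi
      have he : m / 10 / 10 ^ (k - i) = m / 10 ^ (k + 1 - i) := by
        rw [Nat.div_div_eq_div_mul, Nat.mul_comm, ← pow_succ]
        congr 2
        omega
      simp [he]
    · simp

theorem intLog10_eq (k : Nat) : ∀ (m : Nat), 10 ^ k ≤ m → m < 10 ^ (k + 1) →
    intLog10 m = k := by
  induction k with
  | zero => intro m h1 h2; rw [intLog10, if_neg (by omega)]
  | succ k ih =>
    intro m h1 h2
    have h10 : (10:Nat) ≤ 10 ^ (k + 1) := Nat.le_self_pow (Nat.succ_ne_zero k) 10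
    rw [intLog10, if_pos (by omega)]
    rw [ih (m / 10)
      (by rw [Nat.le_div_iff_mul_le (by omega), ← pow_succ]; exact h1)
      (by rw [Nat.div_lt_iff_lt_mul (by omega), ← pow_succ]; exact h2)]

theorem pow10Below_eq (k : Nat) : ∀ (m : Nat), 10 ^ k ≤ m → m < 10 ^ (k + 1) →
    pow10Below (m : Int) = (10 : Int) ^ k := by
  induction k with
  | zero => intro m h1 h2; rw [pow10Below, if_pos (by exact_mod_cast h2)]; rfl
  | succ k ih =>
    intro m h1 h2
    have h10 : (10:Nat) ≤ 10 ^ (k + 1) := Nat.le_self_pow (Nat.succ_ne_zero k) 10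
    rw [pow10Below, if_neg (by omega)]
    have hfd : PySem.Int.floordiv (m : Int) 10 = ((m / 10 : Nat) : Int) :=
      PySem.Int.floordiv_natCast m 10
    rw [hfd, ih (m / 10)
      (by rw [Nat.le_div_iff_mul_le (by omega), ← pow_succ]; exact h1)
      (by rw [Nat.div_lt_iff_lt_mul (by omega), ← pow_succ]; exact h2)]
    ring

theorem foldZeros (d : Nat) : ∀ (lo : Int) (init : List Char), 1 ≤ lo →
    (PySem.List.pyRange lo (lo + d) 1).foldl
      (fun acc i => if 0 < i then acc ++ ['0'] else acc) init
      = init ++ List.replicate d '0' := by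
  induction d with
  | zero => intro lo init _; simp
  | succ d ih =>
    intro lo init hlo
    rw [PySem.List.pyRange_one_cons (by omega)]
    simp only [List.foldl_cons, if_pos (by omega : (0:Int) < lo)]
    rw [show lo + ((d+1 : Nat) : Int) = (lo + 1) + (d : Nat) by push_cast; ring]
    rw [ih (lo + 1) (init ++ ['0']) (by omega)]
    simp [List.replicate_succ]

theorem foldZeros2 (d : Nat) : ∀ (lo : Int) (init : List Char), 2 ≤ lo →
    (PySem.List.pyRange lo (lo + d) 1).foldl
      (fun acc i => if 1 < i then acc ++ ['0'] else acc) init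
      = init ++ List.replicate d '0' := by
  induction d with
  | zero => intro lo init _; simp
  | succ d ih =>
    intro lo init hlo
    rw [PySem.List.pyRange_one_cons (by omega)]
    simp only [List.foldl_cons, if_pos (by omega : (1:Int) < lo)]
    rw [show lo + ((d+1 : Nat) : Int) = (lo + 1) + (d : Nat) by push_cast; ring]
    rw [ih (lo + 1) (init ++ ['0']) (by omega)]
    simp [List.replicate_succ]

theorem foldZeros9 (d : Nat) : ∀ (lo : Int) (init : List Char), 1 ≤ lo →
    (PySem.List.pyRange lo (lo + d) 1).foldl
      (fun acc i => if 0 < i then acc ++ ['0'] else acc ++ ['1']) init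
      = init ++ List.replicate d '0' := by
  induction d with
  | zero => intro lo init _; simp
  | succ d ih =>
    intro lo init hlo
    rw [PySem.List.pyRange_one_cons (by omega)]
    simp only [List.foldl_cons, if_pos (by omega : (0:Int) < lo)]
    rw [show lo + ((d+1 : Nat) : Int) = (lo + 1) + (d : Nat) by push_cast; ring]
    rw [ih (lo + 1) (init ++ ['0']) (by omega)]
    simp [List.replicate_succ]

theorem ofChars_digitChar (d : Nat) (hd : d < 10) :
    PySem.Int.ofChars? [Nat.digitChar d] = some (d : Int) := by
  interval_cases d <;> decide

theorem ofChars_digit_zeros (d k : Nat) (hd : d < 10) (hk : k ≤ 10) :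
    PySem.Int.ofChars? (Nat.digitChar d :: List.replicate k '0')
      = some ((d * 10 ^ k : Nat) : Int) := by
  interval_cases d <;> interval_cases k <;> decide

theorem ofChars_digit5_zeros (d k : Nat) (hd : d < 10) (hk : k ≤ 9) :
    PySem.Int.ofChars? (Nat.digitChar d :: '5' :: List.replicate k '0')
      = some ((d * 10 ^ (k + 1) + 5 * 10 ^ k : Nat) : Int) := by
  interval_cases d <;> interval_cases k <;> decide

-- ===== VERDICT (by name: the statement is the Claim_ definition above) =====
theorem round_max_spec : Claim_equal_round_max := by
  intro n hDom hPre
  unfold Pre_round_max at hPre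
  unfold Spec_round_max
  simp only [Dom_round_max, pvDomInt, decide_eq_true_eq] at hDom
  lift n to Nat using (by omega) with m
  by_cases hsm : m < 10
  · have hI : intLog10 m = 0 := by rw [intLog10, if_neg (by omega)]
    rw [round_max_alt, if_pos (by exact_mod_cast hsm)]
    rw [round_max]
    simp only [Int.toNat_natCast, hI]
    norm_num
  · have hmB : m < 10 ^ 10 := by omega
    obtain ⟨k, hlo, hhi⟩ : ∃ k, 10 ^ k ≤ m ∧ m < 10 ^ (k + 1) :=
      ⟨Nat.log 10 m, Nat.pow_log_le_self 10 (by omega), Nat.lt_pow_succ_log_self (by omega) m⟩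
    have hk1 : 1 ≤ k := by by_contra h; interval_cases k; omega
    have hk9 : k ≤ 9 := by
      by_contra h
      have : (10:Nat) ^ 10 ≤ 10 ^ k := Nat.pow_le_pow_right (by omega) (by omega)
      omega
    have hA := intLog10_eq k m hlo hhi
    have hC := (toChars_natCast m).trans (digitsAux_eq_map k m hlo hhi)
    have hP := pow10Below_eq k m hlo hhi
    obtain ⟨a, hma, ha1, ha9⟩ : ∃ a, m / 10 ^ k = a ∧ 1 ≤ a ∧ a ≤ 9 := by
      refine ⟨m / 10 ^ k, rfl, ?_, ?_⟩
      · exact (Nat.one_le_div_iff (by positivity)).2 hlo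
      · have h' : m < 10 * 10 ^ k := by have := hhi; rw [pow_succ] at this; omega
        have := (Nat.div_lt_iff_lt_mul (show 0 < 10 ^ k by positivity)).2 h'
        omega
    obtain ⟨b, hmb⟩ : ∃ b, m / 10 ^ (k - 1) % 10 = b := ⟨_, rfl⟩
    have hb : b < 10 := by omega
    have ha10 : a < 10 := by omega
    have hc0 : m / 10 ^ k % 10 = a := by rw [hma]; omega
    -- the two leading characters of str(max_val)
    have hget0 : PySem.List.pyGet? (PySem.Int.toChars (m : Int)) 0 = some (Nat.digitChar a) := by
      rw [hC]
      simp only [PySem.List.pyGet?, PySem.List.pyIdx?, List.length_map, List.length_range]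
      rw [if_pos (by omega), if_pos (by exact_mod_cast (by omega : (0:Int) < ((k+1 : Nat) : Int)))]
      simp only [Option.bind_some, Int.toNat_zero]
      rw [List.getElem?_map, List.getElem?_range (by omega : 0 < k + 1)]
      simp [hc0]
    have hget1 : PySem.List.pyGet? (PySem.Int.toChars (m : Int)) 1 = some (Nat.digitChar b) := by
      rw [hC]
      simp only [PySem.List.pyGet?, PySem.List.pyIdx?, List.length_map, List.length_range]
      rw [if_pos (by omega), if_pos (by exact_mod_cast (by omega : (1:Int) < ((k+1 : Nat) : Int)))]
      simp only [Option.bind_some, Int.toNat_one]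
      rw [List.getElem?_map, List.getElem?_range (by omega : 1 < k + 1)]
      simp [hmb]
    have hpA0 : PySem.Int.ofChars? [Nat.digitChar a] = some (a : Int) := ofChars_digitChar a ha10
    have hpA1 : PySem.Int.ofChars? [Nat.digitChar b] = some (b : Int) := ofChars_digitChar b hb
    have hlen : (((PySem.Int.toChars (m : Int)).length : Nat) : Int) = (k : Int) + 1 := by
      rw [hC]; simp
    -- B-side arithmetic, pushed to Nat
    have hcast : ((10:Int) ^ k) = ((10 ^ k : Nat) : Int) := by push_cast; ring
    have hBp : PySem.Int.floordiv ((10:Int) ^ k) 10 = ((10 ^ (k - 1) : Nat) : Int) := by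
      rw [hcast, show (10:Int) = ((10:Nat):Int) from rfl, PySem.Int.floordiv_natCast]
      congr 1
      rw [show (10:Nat) ^ k = 10 ^ (k - 1) * 10 by rw [← pow_succ]; congr 1; omega]
      exact Nat.mul_div_cancel _ (by omega)
    have hBd0 : PySem.Int.floordiv (m : Int) ((10:Int) ^ k) = (a : Int) := by
      rw [hcast, PySem.Int.floordiv_natCast, hma]
    have hBd1 : PySem.Int.mod (PySem.Int.floordiv (m : Int) ((10 ^ (k - 1) : Nat) : Int)) 10 = (b : Int) := by
      rw [PySem.Int.floordiv_natCast, show (10:Int) = ((10:Nat):Int) from rfl, PySem.Int.mod_natCast, hmb]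
    rw [round_max, round_max_alt]
    simp only [Int.toNat_natCast, hA, hget0, hget1, hpA0, hpA1, hlen, hP, hBp, hBd0, hBd1]
    split_ifs with hd hA9 hb5 hB9a hBb5a hB9b hBb5b hq1 hq2 hq3 hq4
    all_goals try omega
    -- G1: leading digit ≠ 9, second digit ≥ 5
    · have ha8 : a ≤ 8 := by omega
      have hta : PySem.Int.toChars ((a:Int) + 1) = [Nat.digitChar (a + 1)] := by
        rw [show ((a:Int) + 1) = ((a + 1 : Nat) : Int) by push_cast; ring, toChars_natCast,
          digitsAux, if_pos (by omega)]
      rw [hta, PySem.List.pyRange_one_cons (by omega : (0:Int) < (k:Int) + 1)]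
      simp only [List.foldl_cons, if_neg (lt_irrefl (0:Int))]
      rw [show (0:Int) + 1 = 1 from rfl, show ((k:Int) + 1) = 1 + (k:Nat) by ring]
      rw [foldZeros k 1 [Nat.digitChar (a + 1)] le_rfl]
      rw [show [Nat.digitChar (a + 1)] ++ List.replicate k '0'
            = Nat.digitChar (a + 1) :: List.replicate k '0' from rfl]
      rw [ofChars_digit_zeros (a + 1) k (by omega) (by omega)]
      simp only [Option.getD_some]
      push_cast
      ring
    -- G2: leading digit ≠ 9, second digit < 5
    · rw [PySem.List.pyRange_one_cons (by omega : (0:Int) < (k:Int) + 1)]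
      rw [show (0:Int) + 1 = 1 from rfl]
      rw [PySem.List.pyRange_one_cons (by omega : (1:Int) < (k:Int) + 1)]
      simp only [List.foldl_cons, if_neg (by omega : ¬ (1:Int) < 0), if_neg (lt_irrefl (1:Int))]
      rw [show (1:Int) + 1 = 2 from rfl, show ((k:Int) + 1) = 2 + ((k - 1 : Nat) : Int) by omega]
      rw [foldZeros2 (k - 1) 2 ([Nat.digitChar a] ++ ['5']) le_rfl]
      rw [show ([Nat.digitChar a] ++ ['5']) ++ List.replicate (k - 1) '0'
            = Nat.digitChar a :: '5' :: List.replicate (k - 1) '0' from rfl]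
      rw [ofChars_digit5_zeros a (k - 1) ha10 (by omega)]
      simp only [Option.getD_some]
      rw [show k - 1 + 1 = k by omega]
      push_cast
      ring
    -- G3: leading digit 9
    · rw [PySem.List.pyRange_one_cons (by omega : (0:Int) < (k:Int) + 1)]
      simp only [List.foldl_cons, if_neg (lt_irrefl (0:Int))]
      rw [show (0:Int) + 1 = 1 from rfl]
      rw [show ((k:Int) + 1) = 1 + (k:Nat) by ring]
      rw [foldZeros9 k 1 (([] : List Char) ++ ['1']) le_rfl]
      rw [show (([] : List Char) ++ ['1']) ++ List.replicate k '0' ++ ['0']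
            = Nat.digitChar 1 :: List.replicate (k + 1) '0' by
          simp [List.replicate_succ']
          rfl]
      rw [ofChars_digit_zeros 1 (k + 1) (by omega) (by omega)]
      simp only [Option.getD_some]
      push_cast
      ring
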